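-- pv_equiv track=rewrite | github.com/emx/sage | integrations/levelup/results/control_arm_50/challenges/vanilla_run_31/app.py | waf_check
-- ===== SOURCE A (Python) =====
-- def waf_check(payload):
--     if not payload:
--         return True
--     # Strict blacklist for word-boundary keywords and spaces
--     forbidden = ['UNION', 'WHERE', 'AND', 'OR', ' ', '--', '/*', '*/', 'LIMIT', 'OFFSET']
--     p = str(payload).upper()
--     for word in forbidden:
--         if word in p:
--             return False
--     return True
-- ===== SOURCE B (Python) =====
-- def waf_check(payload):
--     if not payload:
--         return True
--     # window/membership formulation: a forbidden token occurs as a substring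
--     # iff some window p[i:i+L] (L a token length) is exactly a forbidden token
--     bad = {'UNION', 'WHERE', 'AND', 'OR', ' ', '--', '/*', '*/', 'LIMIT', 'OFFSET'}
--     p = str(payload).upper()
--     return not any(p[i:i+L] in bad
--                    for i in range(len(p))
--                    for L in (1, 2, 3, 5, 6))
-- ===== Notes on version B (the rewrite author's own statement) =====
-- stated objective: alternative
-- what changed: A runs one substring scan per forbidden token; B enumerates the windows p[i:i+L] for the candidate token lengths in a single sweep over positions and tests each window for membership in the forbidden set.
import Mathlib
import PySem

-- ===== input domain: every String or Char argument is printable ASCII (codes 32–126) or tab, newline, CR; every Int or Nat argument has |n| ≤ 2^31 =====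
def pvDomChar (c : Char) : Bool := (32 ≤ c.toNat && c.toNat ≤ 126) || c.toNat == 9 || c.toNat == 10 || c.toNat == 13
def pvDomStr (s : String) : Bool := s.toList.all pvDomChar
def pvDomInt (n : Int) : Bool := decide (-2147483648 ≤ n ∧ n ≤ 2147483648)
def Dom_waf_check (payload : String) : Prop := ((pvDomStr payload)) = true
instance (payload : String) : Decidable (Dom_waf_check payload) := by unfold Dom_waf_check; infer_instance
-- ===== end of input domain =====

-- B replaces A's per-token substring scans by one sweep over positions testing each window for set membership (alternative decomposition, same accept/reject value).
-- ===== PORT A =====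
def wafLoopA (forbidden : List String) (p : String) : Bool :=
  match forbidden with
  | [] => true
  | w :: ws => if PySem.Str.isIn w p then false else wafLoopA ws p

def waf_check (payload : String) : Bool :=
  if payload = "" then true
  else
    wafLoopA ["UNION", "WHERE", "AND", "OR", " ", "--", "/*", "*/", "LIMIT", "OFFSET"]
      (PySem.Str.upper payload)

-- ===== PORT B =====
-- the Python set 'bad'; membership in a set of short literal strings is ported as list membership
def wafBad : List (List Char) :=
  ["UNION", "WHERE", "AND", "OR", " ", "--", "/*", "*/", "LIMIT", "OFFSET"].map String.toList

-- p[i:i+L] with 0 ≤ i < len(p), L ≥ 0 is exactly (p.drop i).take L (PySem.List.slice_natCast_add)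
def waf_check_alt (payload : String) : Bool :=
  if payload = "" then true
  else
    let p := (PySem.Str.upper payload).toList
    ! ((List.range p.length).any fun i =>
        [1, 2, 3, 5, 6].any fun L => wafBad.contains ((p.drop i).take L))

-- ===== PRECONDITION & SPEC =====
def Spec_waf_check (payload : String) (out : Bool) : Prop := out = waf_check_alt payload
instance (payload : String) (out : Bool) : Decidable (Spec_waf_check payload out) := by unfold Spec_waf_check; infer_instance

-- ===== CLAIM =====
def Claim_equal_waf_check : Prop := ∀ (payload : String), Dom_waf_check payload → Spec_waf_check payload (waf_check payload)

-- ===== LEMMAS AND PROOFS =====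

theorem wafLoopA_true_iff (ws : List String) (p : String) :
    wafLoopA ws p = true ↔ ∀ w ∈ ws, ¬ w.toList <:+: p.toList := by
  induction ws with
  | nil => simp [wafLoopA]
  | cons w ws ih =>
      simp only [wafLoopA]
      by_cases h : PySem.Str.isIn w p = true
      · have hinf := (PySem.Str.isIn_iff_infix w p).mp h
        rw [if_pos h]
        simp only [Bool.false_eq_true, false_iff, not_forall]
        exact ⟨w, List.mem_cons_self, not_not_intro hinf⟩
      · have hninf : ¬ w.toList <:+: p.toList :=
          fun hc => h ((PySem.Str.isIn_iff_infix w p).mpr hc)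
        rw [if_neg h, ih]
        simp [hninf]

theorem wafBad_lengths : ∀ t ∈ wafBad, t ≠ [] ∧ t.length ∈ [1, 2, 3, 5, 6] := by decide

theorem wafWindows_iff (p : List Char) :
    ((List.range p.length).any fun i =>
        [1, 2, 3, 5, 6].any fun L => wafBad.contains ((p.drop i).take L)) = true
      ↔ ∃ t ∈ wafBad, t <:+: p := by
  constructor
  · intro h
    rcases List.any_eq_true.mp h with ⟨i, _, hi⟩
    rcases List.any_eq_true.mp hi with ⟨L, _, hL⟩
    refine ⟨(p.drop i).take L, List.contains_iff_mem.mp hL, ?_⟩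
    exact ((p.drop i).take_prefix L).isInfix.trans (p.drop_suffix i).isInfix
  · rintro ⟨t, ht, pre, suf, rfl⟩
    rcases wafBad_lengths t ht with ⟨hne, hlen⟩
    refine List.any_eq_true.mpr ⟨pre.length, ?_, List.any_eq_true.mpr ⟨t.length, hlen, ?_⟩⟩
    · refine List.mem_range.mpr ?_
      have : 1 ≤ t.length := List.length_pos_iff.mpr hne
      simp only [List.length_append]
      omega
    · refine List.contains_iff_mem.mpr ?_
      rw [List.append_assoc, List.drop_left, List.take_left']
      · exact ht
      · rfl

-- ===== VERDICT =====
theorem waf_check_spec : Claim_equal_waf_check := by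
  intro payload _
  unfold Spec_waf_check waf_check waf_check_alt
  by_cases hp : payload = ""
  · simp [hp]
  · rw [if_neg hp, if_neg hp]
    rw [Bool.eq_iff_iff, wafLoopA_true_iff]
    rw [Bool.not_eq_true', ← Bool.not_eq_true, wafWindows_iff]
    simp [wafBad]
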